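-- pv_equiv track=rewrite | github.com/tianyu1997/box_aabb | v4/src/planner/pipeline.py | _shortcut_box_sequence
-- ===== SOURCE A (Python) =====
-- def _shortcut_box_sequence(box_seq, adj):
--     """贪心跳跃: 在 box 序列中跳过可直接相邻到达的中间 box.
--
--     从序列起点开始, 每一步尽可能跳到最远的、与当前 box 直接相邻/
--     相同的 box, 从而缩短 box 序列, 减少不必要的绕行.
--     """
--     if len(box_seq) <= 2:
--         return box_seq
--     n = len(box_seq)
--     result = [box_seq[0]]
--     i = 0
--     while i < n - 1:
--         farthest = i + 1
--         nbrs = adj.get(box_seq[i], set())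
--         for j in range(n - 1, i + 1, -1):
--             if box_seq[j] in nbrs:
--                 farthest = j
--                 break
--         result.append(box_seq[farthest])
--         i = farthest
--     return result
-- ===== SOURCE B (Python) =====
-- def _shortcut_box_sequence(box_seq, adj):
--     """Greedy shortcut: precompute each value's LAST position once, then at each
--     step take the max last-position over the current box's neighbors (instead of
--     re-scanning the sequence from the end at every step)."""
--     if len(box_seq) <= 2:
--         return box_seq
--     n = len(box_seq)
--     last = {}
--     for idx, v in enumerate(box_seq):
--         last[v] = idx
--     result = [box_seq[0]]
--     i = 0
--     while i < n - 1:
--         farthest = i + 1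
--         for v in adj.get(box_seq[i], ()):
--             p = last.get(v, -1)
--             if p > farthest:
--                 farthest = p
--         result.append(box_seq[farthest])
--         i = farthest
--     return result
-- ===== Notes on version B (the rewrite author's own statement) =====
-- stated objective: faster
-- what changed: Instead of rescanning the sequence backwards from the end at every greedy step, B precomputes once a dict mapping each box value to its last position and, at each step, folds over the current box's neighbor set taking the maximum last position (default i+1).
import Mathlib
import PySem

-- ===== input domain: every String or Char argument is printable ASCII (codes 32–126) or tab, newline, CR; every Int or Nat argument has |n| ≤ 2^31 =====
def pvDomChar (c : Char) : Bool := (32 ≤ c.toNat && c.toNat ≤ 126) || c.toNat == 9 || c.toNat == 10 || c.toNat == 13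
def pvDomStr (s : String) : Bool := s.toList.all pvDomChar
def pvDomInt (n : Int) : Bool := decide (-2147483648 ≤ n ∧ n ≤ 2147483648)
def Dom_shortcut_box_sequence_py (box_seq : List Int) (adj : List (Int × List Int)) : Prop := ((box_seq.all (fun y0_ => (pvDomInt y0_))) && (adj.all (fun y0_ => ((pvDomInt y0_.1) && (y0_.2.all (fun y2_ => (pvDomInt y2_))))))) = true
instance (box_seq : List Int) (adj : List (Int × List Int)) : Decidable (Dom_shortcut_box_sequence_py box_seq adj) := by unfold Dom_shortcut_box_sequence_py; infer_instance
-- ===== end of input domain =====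

-- B replaces A's per-step backward scan of the whole sequence by a last-position dict
-- built once, folding only over the current box's neighbor set at each step (alternative algorithm).

-- ===== PORT A =====
-- hand port of `for j in range(n - 1, i + 1, -1): if box_seq[j] in nbrs: farthest = j; break`:
-- it visits j = n-1, n-2, …, stop+1 (stop = i+1) and returns the first hit, none when no hit
-- (exact: same indices in the same order, first match breaks).
-- Every sequence index used below is a Nat provably < length, so List.getD is exact for Python's box_seq[j].
def aScan (bs nbrs : List Int) (stop j : Nat) : Option Nat :=
  if _h : stop < j then
    if nbrs.contains (bs.getD j 0) then some j else aScan bs nbrs stop (j - 1)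
  else none
termination_by j
decreasing_by omega

-- the while loop; fuel = n suffices: i strictly increases each iteration (farthest ≥ i+1 > i)
def aLoop (bs : List Int) (d : PySem.Dict Int (List Int)) (n : Nat) : Nat → Nat → List Int → List Int
  | 0, _, res => res
  | fuel + 1, i, res =>
    if i < n - 1 then
      let nbrs := d.getD (bs.getD i 0) []
      let farthest := match aScan bs nbrs (i + 1) (n - 1) with
        | some j => j
        | none => i + 1
      aLoop bs d n fuel farthest (res ++ [bs.getD farthest 0])
    else res

def shortcut_box_sequence_py (box_seq : List Int) (adj : List (Int × List Int)) : List Int :=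
  if box_seq.length ≤ 2 then box_seq
  else aLoop box_seq (PySem.Dict.ofList adj) box_seq.length box_seq.length 0 [box_seq.getD 0 0]

-- ===== PORT B =====
-- `last = {}; for idx, v in enumerate(box_seq): last[v] = idx`
def bLast (bs : List Int) : PySem.Dict Int Int :=
  (PySem.List.enumerate bs).foldl (fun d p => d.insert p.2 p.1) PySem.Dict.empty

-- `for v in adj.get(box_seq[i], ()): p = last.get(v, -1); if p > farthest: farthest = p`
def bStep (last : PySem.Dict Int Int) (nbrs : List Int) (f0 : Int) : Int :=
  nbrs.foldl (fun f v => let p := last.getD v (-1); if f < p then p else f) f0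

def bLoop (bs : List Int) (d : PySem.Dict Int (List Int)) (last : PySem.Dict Int Int) (n : Nat) :
    Nat → Nat → List Int → List Int
  | 0, _, res => res
  | fuel + 1, i, res =>
    if i < n - 1 then
      let nbrs := d.getD (bs.getD i 0) []
      let farthest := (bStep last nbrs ((i : Int) + 1)).toNat
      bLoop bs d last n fuel farthest (res ++ [bs.getD farthest 0])
    else res

def shortcut_box_sequence_py_alt (box_seq : List Int) (adj : List (Int × List Int)) : List Int :=
  if box_seq.length ≤ 2 then box_seq
  else bLoop box_seq (PySem.Dict.ofList adj) (bLast box_seq) box_seq.length box_seq.length 0 [box_seq.getD 0 0]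

-- ===== PRECONDITION & SPEC =====
def Spec_shortcut_box_sequence_py (box_seq : List Int) (adj : List (Int × List Int)) (out : List Int) : Prop := out = shortcut_box_sequence_py_alt box_seq adj
instance (box_seq : List Int) (adj : List (Int × List Int)) (out : List Int) : Decidable (Spec_shortcut_box_sequence_py box_seq adj out) := by unfold Spec_shortcut_box_sequence_py; infer_instance

-- ===== CLAIM (what is proved, stated in full; the proofs are below) =====
def Claim_equal_shortcut_box_sequence_py : Prop := ∀ (box_seq : List Int) (adj : List (Int × List Int)), Dom_shortcut_box_sequence_py box_seq adj → Spec_shortcut_box_sequence_py box_seq adj (shortcut_box_sequence_py box_seq adj)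

-- ===== LEMMAS AND PROOFS =====

theorem getD_mem_of_lt {bs : List Int} {l : Nat} (h : l < bs.length) : bs.getD l 0 ∈ bs := by
  rw [List.getD_eq_getElem bs 0 h]; exact List.getElem_mem h

-- the dict built by `last[v] = idx` over enumerate: a present key's value is the index of
-- the key's LAST occurrence
theorem build_get?_some (bs : List Int) : ∀ (d0 : PySem.Dict Int Int) (s : Int) (v p : Int),
    ((PySem.List.enumerate bs s).foldl (fun d q => d.insert q.2 q.1) d0).get? v = some p →
    (d0.get? v = some p ∧ v ∉ bs) ∨
    (∃ k : Nat, k < bs.length ∧ p = s + k ∧ bs.getD k 0 = v ∧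
      ∀ l : Nat, k < l → l < bs.length → bs.getD l 0 ≠ v) := by
  induction bs with
  | nil => intro d0 s v p h; simp [PySem.List.enumerate_nil] at h; exact Or.inl ⟨h, by simp⟩
  | cons x bs ih =>
    intro d0 s v p h
    rw [PySem.List.enumerate_cons] at h
    simp only [List.foldl_cons] at h
    rcases ih (d0.insert x s) (s+1) v p h with ⟨hg, hnm⟩ | ⟨k, hk, hp, hv, hmax⟩
    · rw [PySem.Dict.get?_insert] at hg
      by_cases hvx : v = x
      · subst hvx
        simp at hg
        refine Or.inr ⟨0, by simp, by omega, rfl, ?_⟩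
        intro l hl0 hllen
        cases l with
        | zero => omega
        | succ l =>
          simp only [List.getD_cons_succ]
          intro hv; exact hnm (hv ▸ getD_mem_of_lt (by simpa using hllen))
      · rw [if_neg hvx] at hg
        exact Or.inl ⟨hg, by simp [hvx, hnm]⟩
    · refine Or.inr ⟨k+1, by simpa using hk, by push_cast; omega, by simpa using hv, ?_⟩
      intro l hl hllen
      cases l with
      | zero => omega
      | succ l => simpa using hmax l (by omega) (by simpa using hllen)

theorem build_get?_none (bs : List Int) : ∀ (d0 : PySem.Dict Int Int) (s : Int) (v : Int),
    ((PySem.List.enumerate bs s).foldl (fun d q => d.insert q.2 q.1) d0).get? v = none →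
    d0.get? v = none ∧ v ∉ bs := by
  induction bs with
  | nil => intro d0 s v h; simp [PySem.List.enumerate_nil] at h; exact ⟨h, by simp⟩
  | cons x bs ih =>
    intro d0 s v h
    rw [PySem.List.enumerate_cons] at h
    simp only [List.foldl_cons] at h
    obtain ⟨hg, hnm⟩ := ih (d0.insert x s) (s+1) v h
    rw [PySem.Dict.get?_insert] at hg
    by_cases hvx : v = x
    · simp [hvx] at hg
    · rw [if_neg hvx] at hg
      exact ⟨hg, by simp [hvx, hnm]⟩

theorem bLast_some {bs : List Int} {v p : Int} (h : (bLast bs).get? v = some p) :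
    ∃ k : Nat, k < bs.length ∧ p = (k : Int) ∧ bs.getD k 0 = v ∧
      ∀ l : Nat, k < l → l < bs.length → bs.getD l 0 ≠ v := by
  rcases build_get?_some bs PySem.Dict.empty 0 v p h with ⟨hg, _⟩ | ⟨k, hk, hp, hv, hmax⟩
  · simp [PySem.Dict.get?_empty] at hg
  · exact ⟨k, hk, by omega, hv, hmax⟩

theorem bLast_mem {bs : List Int} {k : Nat} (hk : k < bs.length) :
    ∃ p, (bLast bs).get? (bs.getD k 0) = some p := by
  cases hq : (bLast bs).get? (bs.getD k 0) with
  | some p => exact ⟨p, rfl⟩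
  | none =>
    have := (build_get?_none bs PySem.Dict.empty 0 _ hq).2
    exact absurd (getD_mem_of_lt hk) this

theorem bLast_last {bs : List Int} {k : Nat} {p : Int} (hk : k < bs.length)
    (h : (bLast bs).get? (bs.getD k 0) = some p) : (k : Int) ≤ p := by
  obtain ⟨k', hk', hp, hv, hmax⟩ := bLast_some h
  by_cases hkk : k' < k
  · exact absurd hv (hv ▸ hmax k hkk hk)
  · omega

theorem bStep_ge (last : PySem.Dict Int Int) (nbrs : List Int) : ∀ f0 : Int, f0 ≤ bStep last nbrs f0 := by
  induction nbrs with
  | nil => intro f0; simp [bStep]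
  | cons v nbrs ih =>
    intro f0
    have hstep : bStep last (v :: nbrs) f0
        = bStep last nbrs (if f0 < last.getD v (-1) then last.getD v (-1) else f0) := by
      simp [bStep]
    by_cases hl : f0 < last.getD v (-1)
    · rw [hstep, if_pos hl]; have := ih (last.getD v (-1)); omega
    · rw [hstep, if_neg hl]; exact ih f0

theorem bStep_cases (last : PySem.Dict Int Int) (nbrs : List Int) : ∀ f0 : Int,
    bStep last nbrs f0 = f0 ∨
    ∃ v ∈ nbrs, last.getD v (-1) = bStep last nbrs f0 ∧ f0 < bStep last nbrs f0 := by
  induction nbrs with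
  | nil => intro f0; simp [bStep]
  | cons v nbrs ih =>
    intro f0
    have hstep : bStep last (v :: nbrs) f0
        = bStep last nbrs (if f0 < last.getD v (-1) then last.getD v (-1) else f0) := by
      simp [bStep]
    rcases ih (if f0 < last.getD v (-1) then last.getD v (-1) else f0) with h | ⟨w, hw, hlw, hlt⟩
    · by_cases hlt : f0 < last.getD v (-1)
      · refine Or.inr ⟨v, List.mem_cons_self, ?_, ?_⟩
        · rw [hstep, h, if_pos hlt]
        · rw [hstep, h, if_pos hlt]; exact hlt
      · left; rw [hstep, h, if_neg hlt]
    · refine Or.inr ⟨w, List.mem_cons_of_mem _ hw, by rw [hstep]; exact hlw, ?_⟩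
      rw [hstep]
      by_cases hl : f0 < last.getD v (-1)
      · rw [if_pos hl] at hlt ⊢; omega
      · rw [if_neg hl] at hlt ⊢; omega

theorem bStep_ub (last : PySem.Dict Int Int) (nbrs : List Int) : ∀ f0 : Int, ∀ v ∈ nbrs,
    last.getD v (-1) ≤ bStep last nbrs f0 := by
  induction nbrs with
  | nil => intro f0 v hv; simp at hv
  | cons w nbrs ih =>
    intro f0 v hv
    have hstep : bStep last (w :: nbrs) f0
        = bStep last nbrs (if f0 < last.getD w (-1) then last.getD w (-1) else f0) := by
      simp [bStep]
    rcases List.mem_cons.mp hv with rfl | hv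
    · rw [hstep]
      by_cases hl : f0 < last.getD v (-1)
      · rw [if_pos hl]; exact bStep_ge last nbrs _
      · rw [if_neg hl]
        have := bStep_ge last nbrs f0
        omega
    · rw [hstep]; exact ih _ v hv

-- A's backward scan returns the LARGEST index in (stop, j] whose box is a neighbor
theorem aScan_some {bs nbrs : List Int} {stop : Nat} : ∀ {j k : Nat}, aScan bs nbrs stop j = some k →
    stop < k ∧ k ≤ j ∧ nbrs.contains (bs.getD k 0) = true ∧
      ∀ l : Nat, k < l → l ≤ j → nbrs.contains (bs.getD l 0) = false := by
  intro j
  induction j using Nat.strong_induction_on with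
  | _ j ih =>
    intro k h
    rw [aScan] at h
    by_cases hsj : stop < j
    · rw [dif_pos hsj] at h
      by_cases hc : nbrs.contains (bs.getD j 0)
      · rw [if_pos hc] at h
        obtain rfl : j = k := by simpa using h
        exact ⟨hsj, le_refl _, hc, fun l hl hl2 => by omega⟩
      · rw [if_neg hc] at h
        obtain ⟨h1, h2, h3, h4⟩ := ih (j - 1) (by omega) h
        refine ⟨h1, by omega, h3, fun l hl hl2 => ?_⟩
        by_cases hlj : l = j
        · subst hlj; simpa using hc
        · exact h4 l hl (by omega)
    · rw [dif_neg hsj] at h; simp at h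

theorem aScan_none {bs nbrs : List Int} {stop : Nat} : ∀ {j : Nat}, aScan bs nbrs stop j = none →
    ∀ l : Nat, stop < l → l ≤ j → nbrs.contains (bs.getD l 0) = false := by
  intro j
  induction j using Nat.strong_induction_on with
  | _ j ih =>
    intro h l hl hl2
    rw [aScan] at h
    by_cases hsj : stop < j
    · rw [dif_pos hsj] at h
      by_cases hc : nbrs.contains (bs.getD j 0)
      · rw [if_pos hc] at h; simp at h
      · rw [if_neg hc] at h
        by_cases hlj : l = j
        · subst hlj; simpa using hc
        · exact ih (j - 1) (by omega) h l hl (by omega)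
    · rw [dif_neg hsj] at h
      omega

theorem get?_of_getD_high {d : PySem.Dict Int Int} {v r : Int} (hge : 0 ≤ r)
    (h : d.getD v (-1) = r) : d.get? v = some r := by
  rw [PySem.Dict.getD_eq_get?_getD] at h
  cases hq : d.get? v with
  | none => rw [hq] at h; simp at h; omega
  | some p => rw [hq] at h; simp at h; exact congrArg some h

-- the two per-step `farthest` computations agree
theorem step_eq (bs nbrs : List Int) (i : Nat) (hn : i + 1 < bs.length) :
    (match aScan bs nbrs (i + 1) (bs.length - 1) with | some j => j | none => i + 1)
    = (bStep (bLast bs) nbrs ((i : Int) + 1)).toNat := by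
  have hge : ((i : Int) + 1) ≤ bStep (bLast bs) nbrs ((i : Int) + 1) := bStep_ge _ _ _
  cases hsc : aScan bs nbrs (i + 1) (bs.length - 1) with
  | some k =>
    obtain ⟨h1, h2, h3, h4⟩ := aScan_some hsc
    have hkn : k < bs.length := by omega
    obtain ⟨p, hp⟩ := bLast_mem hkn
    have hkp : (k : Int) ≤ p := bLast_last hkn hp
    have hmem : bs.getD k 0 ∈ nbrs := by simpa using h3
    have hub : (bLast bs).getD (bs.getD k 0) (-1) ≤ bStep (bLast bs) nbrs ((i : Int) + 1) :=
      bStep_ub _ _ _ _ hmem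
    have hgetD : (bLast bs).getD (bs.getD k 0) (-1) = p := by
      rw [PySem.Dict.getD_eq_get?_getD, hp]; rfl
    have hkr : (k : Int) ≤ bStep (bLast bs) nbrs ((i : Int) + 1) := by omega
    have hrk : bStep (bLast bs) nbrs ((i : Int) + 1) ≤ (k : Int) := by
      rcases bStep_cases (bLast bs) nbrs ((i : Int) + 1) with hc | ⟨v, hv, hlv, hlt⟩
      · omega
      · have hq : (bLast bs).get? v = some (bStep (bLast bs) nbrs ((i : Int) + 1)) :=
          get?_of_getD_high (by omega) hlv
        obtain ⟨k', hk', hp', hv', _⟩ := bLast_some hq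
        by_contra hgt
        push Not at hgt
        have hkk' : k < k' := by omega
        have hf := h4 k' hkk' (by omega)
        rw [hv'] at hf
        simp [hv] at hf
    have heq : bStep (bLast bs) nbrs ((i : Int) + 1) = (k : Int) := le_antisymm hrk hkr
    simp [heq]
  | none =>
    have h4 := aScan_none hsc
    rcases bStep_cases (bLast bs) nbrs ((i : Int) + 1) with hc | ⟨v, hv, hlv, hlt⟩
    · rw [hc]; simp
    · exfalso
      have hq : (bLast bs).get? v = some (bStep (bLast bs) nbrs ((i : Int) + 1)) :=
        get?_of_getD_high (by omega) hlv
      obtain ⟨k', hk', hp', hv', _⟩ := bLast_some hq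
      have hf := h4 k' (by omega) (by omega)
      rw [hv'] at hf
      simp [hv] at hf

theorem loop_eq (bs : List Int) (d : PySem.Dict Int (List Int)) :
    ∀ (fuel i : Nat) (res : List Int),
      aLoop bs d bs.length fuel i res = bLoop bs d (bLast bs) bs.length fuel i res := by
  intro fuel
  induction fuel with
  | zero => intro i res; rfl
  | succ fuel ih =>
    intro i res
    simp only [aLoop, bLoop]
    by_cases hi : i < bs.length - 1
    · rw [if_pos hi, if_pos hi]
      rw [step_eq bs (d.getD (bs.getD i 0) []) i (by omega)]
      exact ih _ _
    · rw [if_neg hi, if_neg hi]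

-- ===== VERDICT (by name: the statement is the Claim_ definition above) =====
theorem shortcut_box_sequence_py_spec : Claim_equal_shortcut_box_sequence_py := by
  intro bs adj _
  unfold Spec_shortcut_box_sequence_py shortcut_box_sequence_py shortcut_box_sequence_py_alt
  by_cases h : bs.length ≤ 2
  · rw [if_pos h, if_pos h]
  · rw [if_neg h, if_neg h]
    exact loop_eq bs _ bs.length 0 _
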